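-- pv_equiv track=rewrite | github.com/samuBe/AdventOfCode2024 | 25/main.py | count_h
-- ===== SOURCE A (Python) =====
-- def count_h(block):
--     # create the add the lock/key
--     temp = []
--     for j in range(len(block[0])):
--         count = 0
--         for i in range(len(block)):
--             count += (block[i][j] == '#')
--         temp.append(count - 1)
--     return temp
-- ===== SOURCE B (Python) =====
-- def count_h(block):
--     # sparse hash index: one sweep over all cells records '#' positions per column
--     hits = {}
--     for row in block:
--         for j, ch in enumerate(row):
--             if ch == '#':
--                 hits[j] = hits.get(j, 0) + 1
--     return [hits.get(j, 0) - 1 for j in range(len(block[0]))]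
-- ===== Notes on version B (the rewrite author's own statement) =====
-- stated objective: alternative
-- what changed: A's per-column nested rescan of all rows is replaced by building a hash map of '#' cell counts keyed by column in one sweep over the cells, then emitting lookups; the inner row scan per column disappears.
import Mathlib
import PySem

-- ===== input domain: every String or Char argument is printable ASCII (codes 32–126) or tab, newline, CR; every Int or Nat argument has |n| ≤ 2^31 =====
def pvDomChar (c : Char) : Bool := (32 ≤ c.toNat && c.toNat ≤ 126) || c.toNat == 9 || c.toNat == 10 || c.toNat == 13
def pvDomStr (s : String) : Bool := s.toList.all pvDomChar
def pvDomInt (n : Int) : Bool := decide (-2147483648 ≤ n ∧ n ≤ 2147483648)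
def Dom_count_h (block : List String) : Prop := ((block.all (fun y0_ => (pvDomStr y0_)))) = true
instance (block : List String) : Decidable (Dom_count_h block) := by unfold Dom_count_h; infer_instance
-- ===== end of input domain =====

-- B replaces A's per-column rescans of the rows by a one-sweep hash map of '#' counts keyed by column, then a lookup pass (alternative decomposition).

-- ===== PORT A =====
-- column-major: for each column index j, scan every row and count '#'
def count_h (block : List String) : List Int :=
  let cols : Int := ((PySem.List.pyGet? block 0).map (fun s => PySem.Str.len s)).getD 0
  (PySem.List.pyRange 0 cols 1).foldl
    (fun temp j =>
      temp ++ [((PySem.List.pyRange 0 (block.length : Int) 1).foldl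
        (fun count i =>
          count + (if PySem.Str.pyGet? (PySem.List.pyGetD block i "") j = some '#' then 1 else 0))
        0) - 1])
    []

-- ===== PORT B =====
-- one sweep over all cells builds a dict column ↦ number of '#'; then lookups per column
def count_h_alt (block : List String) : List Int :=
  let hits : PySem.Dict Int Int := block.foldl
    (fun d row => (PySem.List.enumerate row.toList 0).foldl
        (fun d p => if p.2 = '#' then d.insert p.1 (d.getD p.1 0 + 1) else d) d)
    PySem.Dict.empty
  let cols : Int := ((PySem.List.pyGet? block 0).map (fun s => PySem.Str.len s)).getD 0
  (PySem.List.pyRange 0 cols 1).map (fun j => hits.getD j 0 - 1)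

-- ===== PRECONDITION & SPEC =====
-- Pre_ excludes exactly the inputs where Python A raises IndexError: the empty block
-- (block[0]) and blocks with a row shorter than the first row (block[i][j]).
def Pre_count_h (block : List String) : Prop :=
  block ≠ [] ∧ ∀ s ∈ block, (block.headD "").toList.length ≤ s.toList.length
instance (block : List String) : Decidable (Pre_count_h block) := by unfold Pre_count_h; infer_instance
def pvWitness_count_h : List String := ["#.", "##"]

def Spec_count_h (block : List String) (out : List Int) : Prop := out = count_h_alt block
instance (block : List String) (out : List Int) : Decidable (Spec_count_h block out) := by unfold Spec_count_h; infer_instance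

-- ===== CLAIM (what is proved, stated in full; the proofs are below) =====
def Claim_equal_count_h : Prop := ∀ (block : List String), Dom_count_h block → Pre_count_h block → Spec_count_h block (count_h block)

-- ===== LEMMAS AND PROOFS =====

-- indicator: does column j (counted from start s) of the row hold '#'
def hitInd (cs : List Char) (s j : Int) : Int :=
  if 0 ≤ j - s ∧ cs[(j - s).toNat]? = some '#' then 1 else 0

theorem hitInd_cons (c : Char) (cs : List Char) (s j : Int) :
    hitInd (c :: cs) s j = (if j = s ∧ c = '#' then (1:Int) else 0) + hitInd cs (s+1) j := by
  unfold hitInd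
  rcases lt_trichotomy j s with hlt | heq | hgt
  · rw [if_neg (by rintro ⟨h, -⟩; omega), if_neg (by rintro ⟨h, -⟩; omega),
        if_neg (by rintro ⟨h, -⟩; omega)]
    norm_num
  · subst heq
    have h0 : (j - j).toNat = 0 := by omega
    rw [h0, List.getElem?_cons_zero,
        if_neg (by rintro ⟨h, -⟩; omega : ¬ (0 ≤ j - (j + 1) ∧ cs[(j - (j + 1)).toNat]? = some '#'))]
    by_cases hc : c = '#'
    · rw [if_pos ⟨by omega, by rw [hc]⟩, if_pos ⟨rfl, hc⟩]
      norm_num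
    · rw [if_neg (by rintro ⟨-, h⟩; exact hc (Option.some.inj h)),
          if_neg (by rintro ⟨-, h⟩; exact hc h)]
      norm_num
  · have h3 : (j - s).toNat = (j - (s + 1)).toNat + 1 := by omega
    have e1 : (0 ≤ j - s) := by omega
    have e2 : (0 ≤ j - (s + 1)) := by omega
    have e3 : ¬ (j = s ∧ c = '#') := by rintro ⟨h, -⟩; omega
    simp only [h3, List.getElem?_cons_succ, eq_true e1, eq_true e2, true_and, if_neg e3, zero_add]

-- the per-row inner loop of B bumps exactly the '#' columns: effect on a lookup at column j
theorem row_hits_gen (j : Int) :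
    ∀ (cs : List Char) (s : Int) (d : PySem.Dict Int Int),
      ((PySem.List.enumerate cs s).foldl
          (fun d p => if p.2 = '#' then d.insert p.1 (d.getD p.1 0 + 1) else d) d).getD j 0
        = d.getD j 0 + hitInd cs s j := by
  intro cs
  induction cs with
  | nil =>
      intro s d
      simp [PySem.List.enumerate_nil, hitInd]
  | cons c t ih =>
      intro s d
      rw [PySem.List.enumerate_cons, List.foldl_cons]
      dsimp only
      rw [ih, hitInd_cons]
      by_cases hc : c = '#'
      · rw [if_pos hc, PySem.Dict.getD_insert]
        by_cases hj : j = s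
        · rw [if_pos hj, if_pos ⟨hj, hc⟩, hj]; ring
        · rw [if_neg hj, if_neg (by rintro ⟨h, -⟩; exact hj h)]; ring
      · rw [if_neg hc, if_neg (by rintro ⟨-, h⟩; exact hc h)]; ring

theorem row_hits (cs : List Char) (d : PySem.Dict Int Int) (k : Nat) :
    ((PySem.List.enumerate cs 0).foldl
        (fun d p => if p.2 = '#' then d.insert p.1 (d.getD p.1 0 + 1) else d) d).getD (k : Int) 0
      = d.getD (k : Int) 0 + (if cs[k]? = some '#' then 1 else 0) := by
  rw [row_hits_gen]
  congr 1
  unfold hitInd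
  have h0 : ((k : Int) - 0).toNat = k := by omega
  rw [h0, if_congr (show (0 ≤ (k : Int) - 0 ∧ cs[k]? = some '#') ↔ (cs[k]? = some '#') from
    ⟨fun h => h.2, fun h => ⟨by omega, h⟩⟩) rfl rfl]

-- folding all rows into the dict: lookup at column k is the sum of the per-row indicators
theorem hits_sum (k : Nat) :
    ∀ (bs : List String) (d : PySem.Dict Int Int),
      (bs.foldl
          (fun d row => (PySem.List.enumerate row.toList 0).foldl
              (fun d p => if p.2 = '#' then d.insert p.1 (d.getD p.1 0 + 1) else d) d) d).getD (k : Int) 0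
        = d.getD (k : Int) 0
            + (bs.map (fun row => if row.toList[k]? = some '#' then (1 : Int) else 0)).sum := by
  intro bs
  induction bs with
  | nil => intro d; simp
  | cons r t ih =>
      intro d
      simp only [List.foldl, ih, row_hits, List.map_cons, List.sum_cons]
      ring

-- A's counting foldl over row indices equals a sum of per-row indicators
theorem foldl_add_sum (g : String → Int) :
    ∀ (bs : List String) (a : Int),
      bs.foldl (fun acc row => acc + g row) a = a + (bs.map g).sum := by
  intro bs
  induction bs with
  | nil => intro a; simp
  | cons r t ih => intro a; simp [List.foldl, ih]; ring

theorem count_h_eq_alt (block : List String) : count_h block = count_h_alt block := by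
  unfold count_h count_h_alt
  dsimp only
  rw [PySem.List.foldl_append_singleton_eq_map]
  apply List.ext_getElem
  · simp
  · intro k h1 h2
    simp only [List.nil_append, List.getElem_map, PySem.List.getElem_pyRange_one, zero_add]
    rw [hits_sum k block PySem.Dict.empty]
    simp only [PySem.Dict.getD_empty, zero_add]
    congr 1
    refine (PySem.List.foldl_pyRange_zero_pyGetD' block ""
      (fun count row => count + if PySem.Str.pyGet? row (k : Int) = some '#' then 1 else 0) 0).trans ?_
    rw [foldl_add_sum]
    simp [PySem.Str.pyGet?]

-- ===== VERDICT (by name: the statement is the Claim_ definition above) =====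
theorem count_h_spec : Claim_equal_count_h := by
  intro block _ _
  exact count_h_eq_alt block
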